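-- pv_equiv track=rewrite | github.com/ibhayb/SoftwareProject-HayberKresovic | jack-resources/Dynamic_Task_Generation/dijkstra_2/formatter_to_xml.py | generate_variable_declarations_from_array
-- ===== SOURCE A (Python) =====
-- def format_single_input_to_xml(name, input_str, current_id):
--     """
--     Formats a single input string into an XML VariableDeclaration block.
--     """
--     xml_output = f"""
-- <VariableDeclaration id="{current_id + 1}">
--   <name>{name}</name>
--   <initializationCode id="{current_id + 2}">
--     <code>{input_str}</code>
--     <domain>MATH</domain>
--   </initializationCode>
-- </VariableDeclaration>
-- """
--     return xml_output, current_id + 2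
--
-- def generate_variable_declarations_from_array(start_id, name_input_array, question_number, question_amount, exercise_constants: list[str, str]|None=None):
--     """
--     Generates a list of VariableDeclaration XML strings from the given input array.
--     """
--     declarations = []
--     current_id = start_id
--
--     current_id = current_id + 1
--
--     index_name = 'index_question_' + str(question_number)
--     input = f"randomIntegerBetween(0, {question_amount})"
--     xml_output, current_id = format_single_input_to_xml(index_name, input, current_id)
--     declarations.append(xml_output)
--
--     for name, single_name, input_str in name_input_array:
--         # generate and append the variables
--         xml_output, current_id = format_single_input_to_xml(name, input_str, current_id)
--         declarations.append(xml_output)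
--
--         # generate and append the variable for a single task
--         input = f"getFromList([var={index_name}],[var={name}])"
--         xml_output, current_id = format_single_input_to_xml(single_name, input, current_id)
--         declarations.append(xml_output)
--
--     if exercise_constants is not None:
--         for exercise_constant in exercise_constants:
--             constant_name, constant_value = exercise_constant
--             xml_output, current_id = format_single_input_to_xml(constant_name, constant_value, current_id)
--             declarations.append(xml_output)
--
--     return declarations
-- ===== SOURCE B (Python) =====
-- def generate_variable_declarations_from_array(start_id, name_input_array, question_number, question_amount, exercise_constants=None):
--     index_name = 'index_question_' + str(question_number)
--     entries = [(index_name, f"randomIntegerBetween(0, {question_amount})")]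
--     for name, single_name, input_str in name_input_array:
--         entries.append((name, input_str))
--         entries.append((single_name, f"getFromList([var={index_name}],[var={name}])"))
--     entries.extend(exercise_constants or [])
--     return [
--         f'\n<VariableDeclaration id="{start_id + 2 + 2 * k}">\n  <name>{name}</name>\n  <initializationCode id="{start_id + 3 + 2 * k}">\n    <code>{code}</code>\n    <domain>MATH</domain>\n  </initializationCode>\n</VariableDeclaration>\n'
--         for k, (name, code) in enumerate(entries)
--     ]
-- ===== Notes on version B (the rewrite author's own statement) =====
-- stated objective: simpler
-- what changed: B first assembles a flat list of (name, code) entries (index entry, per-row pairs, constants), then emits every XML block in one enumerate pass computing both ids in closed form (start_id+2+2k, start_id+3+2k), eliminating the mutable current_id threaded through the helper.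
import Mathlib
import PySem

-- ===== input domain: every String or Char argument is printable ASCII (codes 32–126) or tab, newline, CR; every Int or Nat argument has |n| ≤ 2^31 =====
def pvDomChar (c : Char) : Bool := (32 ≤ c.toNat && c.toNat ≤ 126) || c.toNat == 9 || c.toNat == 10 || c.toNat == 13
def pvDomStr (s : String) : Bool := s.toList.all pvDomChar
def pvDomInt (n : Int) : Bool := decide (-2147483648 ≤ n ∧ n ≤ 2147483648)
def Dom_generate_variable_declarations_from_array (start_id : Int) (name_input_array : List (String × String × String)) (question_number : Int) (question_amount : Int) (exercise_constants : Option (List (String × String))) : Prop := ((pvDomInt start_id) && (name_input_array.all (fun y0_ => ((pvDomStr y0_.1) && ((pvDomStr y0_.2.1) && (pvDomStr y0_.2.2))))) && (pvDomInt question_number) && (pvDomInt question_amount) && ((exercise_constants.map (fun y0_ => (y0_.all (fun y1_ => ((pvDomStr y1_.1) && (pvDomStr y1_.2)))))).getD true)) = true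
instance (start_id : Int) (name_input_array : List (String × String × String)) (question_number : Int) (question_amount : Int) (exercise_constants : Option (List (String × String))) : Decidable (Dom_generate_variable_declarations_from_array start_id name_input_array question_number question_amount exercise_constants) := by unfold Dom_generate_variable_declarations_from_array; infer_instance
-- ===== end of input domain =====

-- B replaces the mutable current_id threaded through A's helper by a single pass over a
-- pre-assembled (name, code) entry list, computing both ids in closed form from the index (objective: simpler).

-- ===== PORT A =====
def format_single_input_to_xml (name : String) (input_str : String) (current_id : Int) : String × Int :=
  ("\n<VariableDeclaration id=\"" ++ PySem.Int.toStr (current_id + 1) ++ "\">\n  <name>" ++ name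
    ++ "</name>\n  <initializationCode id=\"" ++ PySem.Int.toStr (current_id + 2) ++ "\">\n    <code>"
    ++ input_str ++ "</code>\n    <domain>MATH</domain>\n  </initializationCode>\n</VariableDeclaration>\n",
   current_id + 2)

def generate_variable_declarations_from_array (start_id : Int) (name_input_array : List (String × String × String)) (question_number : Int) (question_amount : Int) (exercise_constants : Option (List (String × String))) : List String :=
  let current_id := start_id
  let current_id := current_id + 1
  let index_name := "index_question_" ++ PySem.Int.toStr question_number
  let inp := "randomIntegerBetween(0, " ++ PySem.Int.toStr question_amount ++ ")"
  let r0 := format_single_input_to_xml index_name inp current_id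
  let st := name_input_array.foldl (fun (st : List String × Int) (nsi : String × String × String) =>
      let r1 := format_single_input_to_xml nsi.1 nsi.2.2 st.2
      let inp2 := "getFromList([var=" ++ index_name ++ "],[var=" ++ nsi.1 ++ "])"
      let r2 := format_single_input_to_xml nsi.2.1 inp2 r1.2
      (st.1 ++ [r1.1, r2.1], r2.2)) ([r0.1], r0.2)
  match exercise_constants with
  | none => st.1
  | some cs =>
      (cs.foldl (fun (st : List String × Int) (ec : String × String) =>
          let r := format_single_input_to_xml ec.1 ec.2 st.2
          (st.1 ++ [r.1], r.2)) st).1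

-- ===== PORT B =====
-- B's f-string body, as a helper (ids computed from the enumerate index k)
def emit_entry (start_id : Int) (ke : Int × String × String) : String :=
  "\n<VariableDeclaration id=\"" ++ PySem.Int.toStr (start_id + 2 + 2 * ke.1) ++ "\">\n  <name>" ++ ke.2.1
    ++ "</name>\n  <initializationCode id=\"" ++ PySem.Int.toStr (start_id + 3 + 2 * ke.1) ++ "\">\n    <code>"
    ++ ke.2.2 ++ "</code>\n    <domain>MATH</domain>\n  </initializationCode>\n</VariableDeclaration>\n"

def generate_variable_declarations_from_array_alt (start_id : Int) (name_input_array : List (String × String × String)) (question_number : Int) (question_amount : Int) (exercise_constants : Option (List (String × String))) : List String :=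
  let index_name := "index_question_" ++ PySem.Int.toStr question_number
  let entries : List (String × String) :=
    [(index_name, "randomIntegerBetween(0, " ++ PySem.Int.toStr question_amount ++ ")")]
  let entries := name_input_array.foldl (fun (es : List (String × String)) (nsi : String × String × String) =>
      es ++ [(nsi.1, nsi.2.2), (nsi.2.1, "getFromList([var=" ++ index_name ++ "],[var=" ++ nsi.1 ++ "])")]) entries
  let entries := entries ++ exercise_constants.getD []
  (PySem.List.enumerate entries 0).map (emit_entry start_id)

-- ===== PRECONDITION & SPEC =====
def Spec_generate_variable_declarations_from_array (start_id : Int) (name_input_array : List (String × String × String)) (question_number : Int) (question_amount : Int) (exercise_constants : Option (List (String × String))) (out : List String) : Prop := out = generate_variable_declarations_from_array_alt start_id name_input_array question_number question_amount exercise_constants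
instance (start_id : Int) (name_input_array : List (String × String × String)) (question_number : Int) (question_amount : Int) (exercise_constants : Option (List (String × String))) (out : List String) : Decidable (Spec_generate_variable_declarations_from_array start_id name_input_array question_number question_amount exercise_constants out) := by unfold Spec_generate_variable_declarations_from_array; infer_instance

-- ===== CLAIM (what is proved, stated in full; the proofs are below) =====
def Claim_equal_generate_variable_declarations_from_array : Prop := ∀ (start_id : Int) (name_input_array : List (String × String × String)) (question_number : Int) (question_amount : Int) (exercise_constants : Option (List (String × String))), Dom_generate_variable_declarations_from_array start_id name_input_array question_number question_amount exercise_constants → Spec_generate_variable_declarations_from_array start_id name_input_array question_number question_amount exercise_constants (generate_variable_declarations_from_array start_id name_input_array question_number question_amount exercise_constants)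

-- ===== LEMMAS AND PROOFS =====

-- canonical block: the XML string emitted when current_id = c on entry
def pvBlk (c : Int) (n i : String) : String :=
  "\n<VariableDeclaration id=\"" ++ PySem.Int.toStr (c + 1) ++ "\">\n  <name>" ++ n
    ++ "</name>\n  <initializationCode id=\"" ++ PySem.Int.toStr (c + 2) ++ "\">\n    <code>"
    ++ i ++ "</code>\n    <domain>MATH</domain>\n  </initializationCode>\n</VariableDeclaration>\n"

def pvGfl (ix n : String) : String := "getFromList([var=" ++ ix ++ "],[var=" ++ n ++ "])"

-- canonical blocks of the main loop starting at current_id = c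
def pvPairBlks (ix : String) (l : List (String × String × String)) (c : Int) : List String :=
  match l with
  | [] => []
  | nsi :: t => pvBlk c nsi.1 nsi.2.2 :: pvBlk (c + 2) nsi.2.1 (pvGfl ix nsi.1) :: pvPairBlks ix t (c + 4)

def pvConstBlks (l : List (String × String)) (c : Int) : List String :=
  match l with
  | [] => []
  | nv :: t => pvBlk c nv.1 nv.2 :: pvConstBlks t (c + 2)

-- B's entry pairs contributed by the main array
def pvPairEntries (ix : String) (l : List (String × String × String)) : List (String × String) :=
  match l with
  | [] => []
  | nsi :: t => (nsi.1, nsi.2.2) :: (nsi.2.1, pvGfl ix nsi.1) :: pvPairEntries ix t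

theorem fmt_eq (n i : String) (c : Int) : format_single_input_to_xml n i c = (pvBlk c n i, c + 2) := rfl

theorem emit_eq (s k : Int) (e : String × String) :
    emit_entry s (k, e) = pvBlk (s + 1 + 2 * k) e.1 e.2 := by
  have h1 : s + 2 + 2 * k = s + 1 + 2 * k + 1 := by ring
  have h2 : s + 3 + 2 * k = s + 1 + 2 * k + 2 := by ring
  simp [emit_entry, pvBlk, h1, h2]

theorem foldA_eq (ix : String) (l : List (String × String × String)) (acc : List String) (c : Int) :
    l.foldl (fun (st : List String × Int) (nsi : String × String × String) =>
      (st.1 ++ [pvBlk st.2 nsi.1 nsi.2.2,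
        pvBlk (st.2 + 2) nsi.2.1 ("getFromList([var=" ++ ix ++ "],[var=" ++ nsi.1 ++ "])")],
       st.2 + 2 + 2)) (acc, c)
    = (acc ++ pvPairBlks ix l c, c + 4 * l.length) := by
  induction l generalizing acc c with
  | nil => simp [pvPairBlks]
  | cons h t ih =>
      simp only [List.foldl_cons]
      rw [ih]
      refine Prod.ext ?_ (by simp only [List.length_cons]; push_cast; ring)
      have h4 : c + 2 + 2 = c + 4 := by ring
      simp [pvPairBlks, pvGfl, h4]

theorem foldC_eq (l : List (String × String)) (acc : List String) (c : Int) :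
    l.foldl (fun (st : List String × Int) (ec : String × String) =>
      (st.1 ++ [pvBlk st.2 ec.1 ec.2], st.2 + 2)) (acc, c)
    = (acc ++ pvConstBlks l c, c + 2 * l.length) := by
  induction l generalizing acc c with
  | nil => simp [pvConstBlks]
  | cons h t ih =>
      simp only [List.foldl_cons]
      rw [ih]
      refine Prod.ext ?_ (by simp only [List.length_cons]; push_cast; ring)
      simp [pvConstBlks]

theorem foldE_eq (ix : String) (l : List (String × String × String)) (acc : List (String × String)) :
    l.foldl (fun (es : List (String × String)) (nsi : String × String × String) =>
      es ++ [(nsi.1, nsi.2.2), (nsi.2.1, "getFromList([var=" ++ ix ++ "],[var=" ++ nsi.1 ++ "])")]) acc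
    = acc ++ pvPairEntries ix l := by
  induction l generalizing acc with
  | nil => simp [pvPairEntries]
  | cons h t ih => simp [pvPairEntries, ih, pvGfl]

theorem length_pvPairEntries (ix : String) (l : List (String × String × String)) :
    (pvPairEntries ix l).length = 2 * l.length := by
  induction l with
  | nil => simp [pvPairEntries]
  | cons h t ih => simp [pvPairEntries, ih]; omega

theorem mapB_pairs (s : Int) (ix : String) (l : List (String × String × String)) (k : Int) :
    (PySem.List.enumerate (pvPairEntries ix l) k).map (emit_entry s)
    = pvPairBlks ix l (s + 1 + 2 * k) := by
  induction l generalizing k with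
  | nil => simp [pvPairEntries, pvPairBlks, PySem.List.enumerate_nil]
  | cons h t ih =>
      simp only [pvPairEntries, PySem.List.enumerate_cons, List.map_cons, emit_eq, ih]
      have h1 : s + 1 + 2 * (k + 1) = s + 1 + 2 * k + 2 := by ring
      have h2 : s + 1 + 2 * (k + 1 + 1) = s + 1 + 2 * k + 4 := by ring
      simp [pvPairBlks, h1, h2]

theorem mapB_consts (s : Int) (l : List (String × String)) (k : Int) :
    (PySem.List.enumerate l k).map (emit_entry s) = pvConstBlks l (s + 1 + 2 * k) := by
  induction l generalizing k with
  | nil => simp [pvConstBlks, PySem.List.enumerate_nil]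
  | cons h t ih =>
      simp only [PySem.List.enumerate_cons, List.map_cons, emit_eq, ih]
      have h1 : s + 1 + 2 * (k + 1) = s + 1 + 2 * k + 2 := by ring
      simp [pvConstBlks, h1]

theorem alt_eq (start_id : Int) (arr : List (String × String × String)) (qn qa : Int)
    (ec : Option (List (String × String))) :
    generate_variable_declarations_from_array_alt start_id arr qn qa ec
    = pvBlk (start_id + 1) ("index_question_" ++ PySem.Int.toStr qn)
        ("randomIntegerBetween(0, " ++ PySem.Int.toStr qa ++ ")")
      :: (pvPairBlks ("index_question_" ++ PySem.Int.toStr qn) arr (start_id + 3)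
          ++ pvConstBlks (ec.getD []) (start_id + 3 + 4 * arr.length)) := by
  simp only [generate_variable_declarations_from_array_alt, foldE_eq]
  simp only [List.cons_append, List.nil_append]
  rw [PySem.List.enumerate_cons, List.map_cons, emit_eq,
    PySem.List.enumerate_append, List.map_append, mapB_pairs, mapB_consts,
    length_pvPairEntries]
  have h0 : start_id + 1 + 2 * (0 : Int) = start_id + 1 := by ring
  have h1 : start_id + 1 + 2 * ((0 : Int) + 1) = start_id + 3 := by ring
  have h2 : start_id + 1 + 2 * ((0 : Int) + 1 + ((2 * arr.length : Nat) : Int))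
      = start_id + 3 + 4 * (arr.length : Int) := by push_cast; ring
  rw [h0, h1, h2]

theorem a_eq (start_id : Int) (arr : List (String × String × String)) (qn qa : Int)
    (ec : Option (List (String × String))) :
    generate_variable_declarations_from_array start_id arr qn qa ec
    = pvBlk (start_id + 1) ("index_question_" ++ PySem.Int.toStr qn)
        ("randomIntegerBetween(0, " ++ PySem.Int.toStr qa ++ ")")
      :: (pvPairBlks ("index_question_" ++ PySem.Int.toStr qn) arr (start_id + 3)
          ++ pvConstBlks (ec.getD []) (start_id + 3 + 4 * arr.length)) := by
  have h3 : start_id + 1 + 2 = start_id + 3 := by ring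
  cases ec with
  | none =>
      unfold generate_variable_declarations_from_array
      simp only [fmt_eq]
      rw [foldA_eq, h3]
      simp [pvConstBlks]
  | some cs =>
      unfold generate_variable_declarations_from_array
      simp only [fmt_eq]
      rw [foldA_eq, h3, foldC_eq]
      simp

-- ===== VERDICT (by name: the statement is the Claim_ definition above) =====
theorem generate_variable_declarations_from_array_spec : Claim_equal_generate_variable_declarations_from_array := by
  intro s arr qn qa ec _
  unfold Spec_generate_variable_declarations_from_array
  rw [a_eq, alt_eq]
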